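-- pv_equiv track=rewrite | github.com/vesti-mobi/Ideia-vesti | PainelCSGerencial/merge_data.py | derive_cs_names
-- ===== SOURCE A (Python) =====
-- def derive_cs_names(companies: list, nps: list) -> list[str]:
--     s = set()
--     for c in companies:
--         a = (c.get("anjo") or "").strip()
--         if a:
--             s.add(a)
--     for r in nps:
--         a = (r.get("anjo") or "").strip() if r.get("anjo") else ""
--         if a:
--             s.add(a)
--     return sorted(s)
-- ===== SOURCE B (Python) =====
-- def derive_cs_names(companies: list, nps: list) -> list[str]:
--     names = []
--     for d in companies + nps:
--         a = (d.get("anjo") or "").strip()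
--         if a:
--             names.append(a)
--     names.sort()
--     out = []
--     prev = None
--     for a in names:
--         if a != prev:
--             out.append(a)
--             prev = a
--     return out
-- ===== Notes on version B (the rewrite author's own statement) =====
-- stated objective: alternative
-- what changed: B replaces A's hash-set accumulation across two separate loops by collecting all qualifying trimmed names into one flat list over the concatenated input, sorting it once, and deduplicating by collapsing adjacent equal elements in a single linear scan with a last-emitted tracker.
import Mathlib
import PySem

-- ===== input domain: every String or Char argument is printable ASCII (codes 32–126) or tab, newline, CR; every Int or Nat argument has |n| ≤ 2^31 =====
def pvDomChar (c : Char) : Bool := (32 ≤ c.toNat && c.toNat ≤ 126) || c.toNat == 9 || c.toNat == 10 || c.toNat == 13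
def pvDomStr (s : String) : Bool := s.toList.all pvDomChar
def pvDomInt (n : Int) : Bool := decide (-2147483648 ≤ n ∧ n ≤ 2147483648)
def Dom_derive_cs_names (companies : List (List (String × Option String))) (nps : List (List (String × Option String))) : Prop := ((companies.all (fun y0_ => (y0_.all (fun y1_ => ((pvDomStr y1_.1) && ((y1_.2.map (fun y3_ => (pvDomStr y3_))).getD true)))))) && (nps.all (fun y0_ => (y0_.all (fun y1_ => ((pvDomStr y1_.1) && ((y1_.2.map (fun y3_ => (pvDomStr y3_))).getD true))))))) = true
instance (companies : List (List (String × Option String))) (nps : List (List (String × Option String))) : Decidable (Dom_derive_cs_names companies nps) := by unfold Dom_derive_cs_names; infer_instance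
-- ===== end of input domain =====

-- B replaces A's hash-set deduplication by collect-all / sort-once / collapse-adjacent-duplicates (objective: alternative, same result).

-- `o or ""` on an Optional[str] value (falsy: None and ""):
def pvOrEmpty (o : Option String) : String :=
  match o with
  | some v => if v ≠ "" then v else ""
  | none => ""

-- Python truthiness of an Optional[str]:
def pvTruthy (o : Option String) : Bool :=
  match o with
  | some v => v != ""
  | none => false

-- ===== PORT A =====
def derive_cs_names (companies : List (List (String × Option String))) (nps : List (List (String × Option String))) : List String :=
  let s : PySem.Set String :=
    companies.foldl (fun s c =>
      let a := PySem.Str.strip (pvOrEmpty ((PySem.Dict.get? (PySem.Dict.mk c) "anjo").join))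
      if a ≠ "" then PySem.Set.add s a else s) PySem.Set.empty
  let s :=
    nps.foldl (fun s r =>
      let a := if pvTruthy ((PySem.Dict.get? (PySem.Dict.mk r) "anjo").join)
               then PySem.Str.strip (pvOrEmpty ((PySem.Dict.get? (PySem.Dict.mk r) "anjo").join))
               else ""
      if a ≠ "" then PySem.Set.add s a else s) s
  PySem.List.sorted s (fun x => x) false

-- ===== PORT B =====
def derive_cs_names_alt (companies : List (List (String × Option String))) (nps : List (List (String × Option String))) : List String :=
  let names := (companies ++ nps).foldl (fun acc d =>
      let a := PySem.Str.strip (pvOrEmpty ((PySem.Dict.get? (PySem.Dict.mk d) "anjo").join))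
      if a ≠ "" then acc ++ [a] else acc) []
  let ns := PySem.List.sorted names (fun x => x) false
  (ns.foldl (fun st a => if some a ≠ st.2 then (st.1 ++ [a], some a) else st)
      (([] : List String), (none : Option String))).1

-- ===== PRECONDITION & SPEC =====
def Spec_derive_cs_names (companies : List (List (String × Option String))) (nps : List (List (String × Option String))) (out : List String) : Prop := out = derive_cs_names_alt companies nps
instance (companies : List (List (String × Option String))) (nps : List (List (String × Option String))) (out : List String) : Decidable (Spec_derive_cs_names companies nps out) := by unfold Spec_derive_cs_names; infer_instance

-- ===== CLAIM (what is proved, stated in full; the proofs are below) =====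
def Claim_equal_derive_cs_names : Prop := ∀ (companies : List (List (String × Option String))) (nps : List (List (String × Option String))), Dom_derive_cs_names companies nps → Spec_derive_cs_names companies nps (derive_cs_names companies nps)

-- ===== LEMMAS AND PROOFS =====

-- the per-dict extracted (trimmed) name, shared by the analysis of both ports
def pvName (d : List (String × Option String)) : String :=
  PySem.Str.strip (pvOrEmpty ((PySem.Dict.get? (PySem.Dict.mk d) "anjo").join))

lemma pvName_nps (g : Option String) :
    (if pvTruthy g then PySem.Str.strip (pvOrEmpty g) else "") = PySem.Str.strip (pvOrEmpty g) := by
  match g with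
  | none => rfl
  | some v =>
    by_cases h : v = ""
    · simp [pvTruthy, pvOrEmpty, h]; rfl
    · simp [pvTruthy, h]

-- recursive form of B's collapse loop
def pvCollapse : Option String → List String → List String
  | _, [] => []
  | prev, a :: t => if some a ≠ prev then a :: pvCollapse (some a) t else pvCollapse prev t

lemma pvCollapse_fold (ys : List String) : ∀ (out : List String) (prev : Option String),
    (ys.foldl (fun st a => if some a ≠ st.2 then (st.1 ++ [a], some a) else st) (out, prev)).1
      = out ++ pvCollapse prev ys := by
  induction ys with
  | nil => simp [pvCollapse]
  | cons a t ih =>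
    intro out prev
    simp only [List.foldl_cons, pvCollapse]
    by_cases h : some a ≠ prev
    · rw [if_pos h, if_pos h, ih, List.append_assoc]; rfl
    · rw [if_neg h, if_neg h, ih]

lemma pvCollapse_pairwise : ∀ (ys : List String) (prev : Option String),
    ys.Pairwise (· ≤ ·) → (∀ y ∈ ys, ∀ p, prev = some p → p ≤ y) →
    (pvCollapse prev ys).Pairwise (· < ·) ∧ ∀ y ∈ pvCollapse prev ys, ∀ p, prev = some p → p < y := by
  intro ys
  induction ys with
  | nil => intro prev _ _; simp [pvCollapse]
  | cons a t ih =>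
    intro prev hpw hle
    have ha : ∀ y ∈ t, a ≤ y := fun y hy => List.rel_of_pairwise_cons hpw hy
    have hpt : t.Pairwise (· ≤ ·) := hpw.of_cons
    by_cases h : some a ≠ prev
    · have ih' := ih (some a) hpt (fun y hy p hp => by cases hp; exact ha y hy)
      refine ⟨?_, ?_⟩
      · simp only [pvCollapse, if_pos h]
        exact List.Pairwise.cons (fun y hy => (ih'.2 y hy a rfl)) ih'.1
      · simp only [pvCollapse, if_pos h]
        intro y hy p hp
        rcases List.mem_cons.mp hy with rfl | hy'
        · rw [hp] at h
          have hpa : p ≤ y := hle y (List.mem_cons_self) p hp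
          exact lt_of_le_of_ne hpa (fun he => h (by rw [he]))
        · have hpa : p ≤ a := hle a List.mem_cons_self p hp
          exact lt_of_le_of_lt hpa (ih'.2 y hy' a rfl)
    · have hprev : prev = some a := (not_not.mp h).symm
      have ih' := ih prev hpt (fun y hy p hp => by
        rw [hprev] at hp; cases hp; exact ha y hy)
      simpa [pvCollapse, h] using ih'

lemma pvCollapse_mem : ∀ (ys : List String) (prev : Option String),
    ys.Pairwise (· ≤ ·) → (∀ y ∈ ys, ∀ p, prev = some p → p ≤ y) →
    ∀ x, x ∈ pvCollapse prev ys ↔ x ∈ ys ∧ some x ≠ prev := by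
  intro ys
  induction ys with
  | nil => intro prev _ _ x; simp [pvCollapse]
  | cons a t ih =>
    intro prev hpw hle x
    have ha : ∀ y ∈ t, a ≤ y := fun y hy => List.rel_of_pairwise_cons hpw hy
    have hpt : t.Pairwise (· ≤ ·) := hpw.of_cons
    by_cases h : some a ≠ prev
    · have ih' := ih (some a) hpt (fun y hy p hp => by cases hp; exact ha y hy) x
      simp only [pvCollapse, if_pos h, List.mem_cons, ih']
      constructor
      · rintro (rfl | ⟨hx, hne⟩)
        · exact ⟨Or.inl rfl, h⟩
        · refine ⟨Or.inr hx, ?_⟩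
          intro hp
          rcases prev with _ | p
          · simp at hp
          · have hpa : p ≤ a := hle a List.mem_cons_self p rfl
            have hax : a ≤ x := ha x hx
            have hxa : x ≠ a := by simpa using hne
            have hax' : a < x := lt_of_le_of_ne hax (Ne.symm hxa)
            have hpx : p < x := lt_of_le_of_lt hpa hax'
            have hxp : x = p := by simpa using hp
            exact absurd hxp (ne_of_gt hpx)
      · rintro ⟨rfl | hx, hne⟩
        · exact Or.inl rfl
        · by_cases hxa : x = a
          · exact Or.inl hxa
          · exact Or.inr ⟨hx, by simpa using hxa⟩
    · have hprev : prev = some a := (not_not.mp h).symm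
      have ih' := ih prev hpt (fun y hy p hp => by
        rw [hprev] at hp; cases hp; exact ha y hy) x
      simp only [pvCollapse, if_neg h, ih', List.mem_cons]
      constructor
      · rintro ⟨hx, hne⟩; exact ⟨Or.inr hx, hne⟩
      · rintro ⟨rfl | hx, hne⟩
        · exact absurd hprev.symm (by simpa using hne)
        · exact ⟨hx, hne⟩

-- ===== VERDICT (by name: the statement is the Claim_ definition above) =====
theorem derive_cs_names_spec : Claim_equal_derive_cs_names := by
  intro companies nps _
  unfold Spec_derive_cs_names derive_cs_names derive_cs_names_alt
  simp only []
  -- rewrite A's nps loop body to the companies-shaped one (the conditional strip is the same value)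
  have hnps : ∀ s0 : PySem.Set String,
      List.foldl (fun s r =>
        if (if pvTruthy ((PySem.Dict.get? (PySem.Dict.mk r) "anjo").join)
            then PySem.Str.strip (pvOrEmpty ((PySem.Dict.get? (PySem.Dict.mk r) "anjo").join))
            else "") ≠ ""
        then PySem.Set.add s (if pvTruthy ((PySem.Dict.get? (PySem.Dict.mk r) "anjo").join)
            then PySem.Str.strip (pvOrEmpty ((PySem.Dict.get? (PySem.Dict.mk r) "anjo").join))
            else "")
        else s) s0 nps
      = List.foldl (fun s r => if pvName r ≠ "" then PySem.Set.add s (pvName r) else s) s0 nps := by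
    intro s0
    apply PySem.List.foldl_congr_mem
    intro acc r _
    simp only [pvName, pvName_nps]
  rw [hnps]
  rw [show (List.foldl (fun s c =>
        if PySem.Str.strip (pvOrEmpty ((PySem.Dict.get? (PySem.Dict.mk c) "anjo").join)) ≠ ""
        then PySem.Set.add s (PySem.Str.strip (pvOrEmpty ((PySem.Dict.get? (PySem.Dict.mk c) "anjo").join)))
        else s) PySem.Set.empty companies)
      = List.foldl (fun s c => if pvName c ≠ "" then PySem.Set.add s (pvName c) else s) PySem.Set.empty companies
      from rfl]
  rw [PySem.List.foldl_ite_eq_foldl_filter (l := companies) (p := fun c => pvName c ≠ "")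
        (f := fun s c => PySem.Set.add s (pvName c)),
      PySem.List.foldl_ite_eq_foldl_filter (l := nps) (p := fun r => pvName r ≠ "")
        (f := fun s r => PySem.Set.add s (pvName r))]
  rw [← PySem.Set.update_map_eq_foldl_add, ← PySem.Set.update_map_eq_foldl_add]
  rw [show (PySem.Set.empty : PySem.Set String) = PySem.Set.ofList [] from rfl]
  rw [← PySem.Set.ofList_append, ← PySem.Set.ofList_append]
  simp only [List.nil_append]
  -- B's collection loop = the same flat name list
  rw [pvCollapse_fold, List.nil_append]
  rw [show (List.foldl (fun acc d =>
        if PySem.Str.strip (pvOrEmpty ((PySem.Dict.get? (PySem.Dict.mk d) "anjo").join)) ≠ ""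
        then acc ++ [PySem.Str.strip (pvOrEmpty ((PySem.Dict.get? (PySem.Dict.mk d) "anjo").join))]
        else acc) [] (companies ++ nps))
      = List.foldl (fun acc d => if pvName d ≠ "" then acc ++ [pvName d] else acc) [] (companies ++ nps)
      from rfl]
  rw [PySem.List.foldl_append_ite (p := fun d => pvName d ≠ "") (f := pvName), List.nil_append]
  rw [List.filter_append, List.map_append]
  set names := ((companies.filter fun d => decide (pvName d ≠ "")).map pvName
      ++ (nps.filter fun d => decide (pvName d ≠ "")).map pvName) with hnames
  -- sorted(set(names)) is the adjacent-collapse of sorted(names)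
  have hsp : (PySem.List.sorted names (fun x => x) false).Pairwise (· ≤ ·) := by
    simpa using PySem.List.sorted_pairwise (xs := names) (key := fun x => x)
  have hR := pvCollapse_pairwise (PySem.List.sorted names (fun x => x) false) none hsp (by simp)
  have hmem := pvCollapse_mem (PySem.List.sorted names (fun x => x) false) none hsp (by simp)
  have hnodup : (pvCollapse none (PySem.List.sorted names (fun x => x) false)).Nodup :=
    hR.1.imp ne_of_lt
  apply PySem.List.sorted_eq_of_perm_of_pairwise_lt
  · apply (List.perm_ext_iff_of_nodup hnodup (PySem.Set.nodup_ofList names)).mpr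
    intro x
    rw [hmem x, PySem.Set.mem_ofList, PySem.List.mem_sorted]
    simp
  · exact hR.1
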